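-- pv_equiv track=rewrite | github.com/KhushJogi/Resolution_Method | cs22m051.py | check
-- ===== SOURCE A (Python) =====
-- def check(l):
--     for el1 in l:
--       for el2 in l:
--           if el1 != el2 and len(el1)==len(el2):
--
--               flag = True
--               for i in range(len(el1)):
--                   if i==1:
--                     if el1[i]==el2[i]:
--                       flag = False
--                       break
--                   else:
--                       if el1[i]!=el2[i]:
--                           flag = False
--                           break
--
--               if flag:
--                   return []
--
--
--     return l
-- ===== SOURCE B (Python) =====
-- def check(l):
--     # one pass: map each string's (head, tail-after-index-1) mask to the first char seen at index 1
--     seen = {}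
--     for s in l:
--         if len(s) >= 2:
--             key = (s[:1], s[2:])
--             c = seen.get(key)
--             if c is None:
--                 seen[key] = s[1]
--             elif c != s[1]:
--                 return []
--     return l
-- ===== Notes on version B (the rewrite author's own statement) =====
-- stated objective: faster
-- what changed: Replaced A's all-pairs nested scan (compare every ordered pair of strings character by character) with a single pass that hashes each string of length >= 2 by its index-1-masked key (s[:1], s[2:]) and returns the empty result as soon as a second distinct character at index 1 appears under an already-seen key.
import Mathlib
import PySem

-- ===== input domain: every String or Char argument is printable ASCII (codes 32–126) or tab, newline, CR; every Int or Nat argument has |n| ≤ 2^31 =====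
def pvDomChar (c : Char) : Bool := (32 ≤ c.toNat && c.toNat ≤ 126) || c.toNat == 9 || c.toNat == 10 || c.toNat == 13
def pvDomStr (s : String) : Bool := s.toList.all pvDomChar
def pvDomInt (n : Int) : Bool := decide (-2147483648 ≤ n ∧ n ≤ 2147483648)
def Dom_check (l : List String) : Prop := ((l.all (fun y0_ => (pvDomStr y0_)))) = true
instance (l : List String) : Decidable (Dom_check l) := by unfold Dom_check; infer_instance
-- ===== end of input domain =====

-- B replaces A's O(n^2·L) all-pairs scan by one O(n·L) pass over a dict keyed by the
-- string with index 1 masked out (s[:1], s[2:]), detecting two distinct chars at index 1.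


-- ===== PORT A =====
-- the inner 'for i in range(len(el1))' loop computing flag (with break = returning false)
def checkFlagLoop (a b : List Char) : List Int → Bool
  | [] => true
  | i :: rest =>
    if i = 1 then
      if PySem.List.pyGet? a i == PySem.List.pyGet? b i then false
      else checkFlagLoop a b rest
    else
      if PySem.List.pyGet? a i != PySem.List.pyGet? b i then false
      else checkFlagLoop a b rest

-- the body of the two nested loops: does the pair (el1, el2) make A return []?
def checkTrig (el1 el2 : String) : Bool :=
  el1 != el2 && (PySem.Str.len el1 == PySem.Str.len el2)
    && checkFlagLoop el1.toList el2.toList (PySem.List.pyRange 0 (PySem.Str.len el1) 1)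

def check (l : List String) : List String :=
  if l.any (fun el1 => l.any (fun el2 => checkTrig el1 el2)) then [] else l

-- ===== PORT B =====
-- one pass over l carrying the dict 'seen'; true = the 'return []' branch fired
def checkAltLoop (seen : PySem.Dict (String × String) Char) : List String → Bool
  | [] => false
  | s :: rest =>
    if 2 ≤ PySem.Str.len s then
      let key := (PySem.Str.slice s none (some 1), PySem.Str.slice s (some 2) none)
      match PySem.Str.pyGet? s 1 with
      | none => false  -- unreachable: len s ≥ 2 so s[1] exists
      | some ch =>
        match seen.get? key with
        | none => checkAltLoop (seen.insert key ch) rest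
        | some c => if c != ch then true else checkAltLoop seen rest
    else checkAltLoop seen rest

def check_alt (l : List String) : List String :=
  if checkAltLoop PySem.Dict.empty l then [] else l

-- ===== PRECONDITION & SPEC =====
def Spec_check (l : List String) (out : List String) : Prop := out = check_alt l
instance (l : List String) (out : List String) : Decidable (Spec_check l out) := by unfold Spec_check; infer_instance

-- ===== CLAIM (what is proved, stated in full; the proofs are below) =====
def Claim_equal_check : Prop := ∀ (l : List String), Dom_check l → Spec_check l (check l)

-- ===== LEMMAS AND PROOFS =====

-- the mask key B uses, and the pair condition both programs detect:
-- same key (= same everywhere except index 1, same length) and different chars at index 1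
def keyOf (s : String) : String × String :=
  (PySem.Str.slice s none (some 1), PySem.Str.slice s (some 2) none)

def Tpair (a b : String) : Prop :=
  2 ≤ a.toList.length ∧ 2 ≤ b.toList.length ∧ keyOf a = keyOf b ∧ a.toList[1]? ≠ b.toList[1]?

theorem Tpair_symm {a b : String} (h : Tpair a b) : Tpair b a :=
  ⟨h.2.1, h.1, h.2.2.1.symm, h.2.2.2.symm⟩

theorem keyOf_eq_iff (a b : String) :
    keyOf a = keyOf b ↔ a.toList.take 1 = b.toList.take 1 ∧ a.toList.drop 2 = b.toList.drop 2 := by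
  unfold keyOf
  constructor
  · intro h
    obtain ⟨h1, h2⟩ := Prod.mk.injEq .. ▸ h
    constructor
    · have := congrArg String.toList h1; simpa [pysem] using this
    · have := congrArg String.toList h2; simpa [pysem] using this
  · intro ⟨h1, h2⟩
    have e1 : (PySem.Str.slice a none (some 1)).toList = (PySem.Str.slice b none (some 1)).toList := by
      simpa [pysem] using h1
    have e2 : (PySem.Str.slice a (some 2) none).toList = (PySem.Str.slice b (some 2) none).toList := by
      simpa [pysem] using h2
    exact Prod.ext (String.toList_inj.mp e1) (String.toList_inj.mp e2)

theorem Tpair_lengths {a b : String} (h : Tpair a b) : a.toList.length = b.toList.length := by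
  obtain ⟨ha, hb, hk, _⟩ := h
  have := (keyOf_eq_iff a b).mp hk
  have hd := congrArg List.length this.2
  simp only [List.length_drop] at hd
  omega

-- ===== A-side characterisation =====

theorem checkFlagLoop_iff (a b : List Char) (is : List Int) :
    checkFlagLoop a b is = true ↔
      ∀ i ∈ is, (i = 1 → PySem.List.pyGet? a i ≠ PySem.List.pyGet? b i) ∧
                (i ≠ 1 → PySem.List.pyGet? a i = PySem.List.pyGet? b i) := by
  induction is with
  | nil => simp [checkFlagLoop]
  | cons i rest ih =>
    by_cases h1 : i = 1
    · subst h1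
      by_cases he : PySem.List.pyGet? a 1 = PySem.List.pyGet? b 1
      · rw [show checkFlagLoop a b (1 :: rest) = false from by simp [checkFlagLoop, he]]
        simp only [Bool.false_eq_true, false_iff, not_forall]
        refine ⟨1, List.mem_cons.mpr (Or.inl rfl), fun h => h.1 rfl he⟩
      · rw [show checkFlagLoop a b (1 :: rest) = checkFlagLoop a b rest from by
          simp [checkFlagLoop, he]]
        rw [ih]
        constructor
        · intro hall j hj
          rcases List.mem_cons.mp hj with rfl | hj
          · exact ⟨fun _ => he, fun h => absurd rfl h⟩
          · exact hall j hj
        · intro hall j hj; exact hall j (List.mem_cons.mpr (Or.inr hj))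
    · by_cases he : PySem.List.pyGet? a i = PySem.List.pyGet? b i
      · rw [show checkFlagLoop a b (i :: rest) = checkFlagLoop a b rest from by
          simp [checkFlagLoop, h1, he]]
        rw [ih]
        constructor
        · intro hall j hj
          rcases List.mem_cons.mp hj with rfl | hj
          · exact ⟨fun h => absurd h h1, fun _ => he⟩
          · exact hall j hj
        · intro hall j hj; exact hall j (List.mem_cons.mpr (Or.inr hj))
      · rw [show checkFlagLoop a b (i :: rest) = false from by simp [checkFlagLoop, h1, he]]
        simp only [Bool.false_eq_true, false_iff, not_forall]
        refine ⟨i, List.mem_cons.mpr (Or.inl rfl), fun h => he (h.2 h1)⟩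

theorem checkTrig_iff (a b : String) : checkTrig a b = true ↔ Tpair a b := by
  unfold checkTrig
  simp only [Bool.and_eq_true, bne_iff_ne, ne_eq, beq_iff_eq, checkFlagLoop_iff,
    PySem.List.mem_pyRange_one, PySem.Str.len_eq]
  constructor
  · rintro ⟨⟨hne, hlen⟩, hall⟩
    have hlen' : a.toList.length = b.toList.length := by exact_mod_cast hlen
    -- turn the ∀ over Int indices into facts about getElem?
    have hget : ∀ j : Nat, j < a.toList.length →
        (j = 1 → a.toList[j]? ≠ b.toList[j]?) ∧ (j ≠ 1 → a.toList[j]? = b.toList[j]?) := by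
      intro j hj
      have := hall (j : Int) ⟨by positivity, by exact_mod_cast hj⟩
      constructor
      · intro h1
        have := this.1 (by exact_mod_cast congrArg (Nat.cast : Nat → Int) h1)
        simpa [PySem.List.pyGet?_natCast] using this
      · intro h1
        have := this.2 (by exact_mod_cast fun h => h1 (by exact_mod_cast h))
        simpa [PySem.List.pyGet?_natCast] using this
    have h2 : 2 ≤ a.toList.length := by
      by_contra hlt
      apply hne
      apply String.toList_inj.mp
      apply List.ext_getElem?
      intro j
      by_cases hj : j < a.toList.length
      · exact (hget j hj).2 (by omega)
      · rw [List.getElem?_eq_none (by omega), List.getElem?_eq_none (by omega)]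
    refine ⟨h2, by omega, (keyOf_eq_iff a b).mpr ⟨?_, ?_⟩, (hget 1 (by omega)).1 rfl⟩
    · apply List.ext_getElem?
      intro j
      rcases Nat.lt_or_ge j 1 with hj | hj
      · interval_cases j
        simp only [List.getElem?_take, if_pos (by omega)]
        exact (hget 0 (by omega)).2 (by omega)
      · rw [List.getElem?_take, List.getElem?_take, if_neg (by omega), if_neg (by omega)]
    · apply List.ext_getElem?
      intro j
      rw [List.getElem?_drop, List.getElem?_drop]
      by_cases hj : 2 + j < a.toList.length
      · exact (hget (2 + j) hj).2 (by omega)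
      · rw [List.getElem?_eq_none (by omega), List.getElem?_eq_none (by omega)]
  · intro ht
    obtain ⟨ha2, hb2, hk, hc⟩ := ht
    obtain ⟨htake, hdrop⟩ := (keyOf_eq_iff a b).mp hk
    have hlen' : a.toList.length = b.toList.length := Tpair_lengths ⟨ha2, hb2, hk, hc⟩
    refine ⟨⟨fun h => hc (by rw [h]), by exact_mod_cast hlen'⟩, ?_⟩
    intro i ⟨hi0, hin⟩
    rw [PySem.List.pyGet?_of_nonneg _ hi0, PySem.List.pyGet?_of_nonneg _ hi0]
    have hitn : i.toNat < a.toList.length := by omega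
    constructor
    · rintro rfl; simpa using hc
    · intro hne1
      have hne1' : i.toNat ≠ 1 := by omega
      rcases Nat.lt_or_ge i.toNat 1 with hj | hj
      · have h0 : i.toNat = 0 := by omega
        have := congrArg (fun t => t[0]?) htake
        simpa [List.getElem?_take, h0] using this
      · have hj2 : 2 ≤ i.toNat := by omega
        have := congrArg (fun t => t[i.toNat - 2]?) hdrop
        simp only [List.getElem?_drop] at this
        have e : 2 + (i.toNat - 2) = i.toNat := by omega
        rwa [e] at this

theorem check_any_iff (l : List String) :
    (l.any (fun el1 => l.any (fun el2 => checkTrig el1 el2)) = true) ↔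
      ∃ a ∈ l, ∃ b ∈ l, Tpair a b := by
  simp [List.any_eq_true, checkTrig_iff]

-- ===== B-side characterisation =====

theorem checkAltLoop_iff (rest : List String) :
    ∀ (p : List String) (seen : PySem.Dict (String × String) Char),
    (∀ k c, seen.get? k = some c →
        ∃ s ∈ p, 2 ≤ s.toList.length ∧ keyOf s = k ∧ s.toList[1]? = some c) →
    (∀ s ∈ p, 2 ≤ s.toList.length → (seen.get? (keyOf s)).isSome = true) →
    (∀ a ∈ p, ∀ b ∈ p, ¬ Tpair a b) →
    (checkAltLoop seen rest = true ↔ ∃ a ∈ p ++ rest, ∃ b ∈ p ++ rest, Tpair a b) := by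
  induction rest with
  | nil =>
    intro p seen h1 h2 h3
    simp only [checkAltLoop, List.append_nil]
    constructor
    · intro h; cases h
    · rintro ⟨a, ha, b, hb, ht⟩; exact absurd ht (h3 a ha b hb)
  | cons s rest ih =>
    intro p seen h1 h2 h3
    have happ : p ++ s :: rest = (p ++ [s]) ++ rest := by simp
    simp only [checkAltLoop]
    have hkey : (PySem.Str.slice s none (some 1), PySem.Str.slice s (some 2) none) = keyOf s := rfl
    split_ifs with hlen
    · -- len s ≥ 2
      have hlen2 : 2 ≤ s.toList.length := by
        have : (2 : Int) ≤ (s.toList.length : Int) := by simpa [PySem.Str.len_eq] using hlen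
        exact_mod_cast this
      have hget1 : PySem.Str.pyGet? s 1 = s.toList[1]? := by simp [pysem]
      have hsome : ∃ ch, s.toList[1]? = some ch :=
        ⟨s.toList[1]'(by omega), List.getElem?_eq_getElem (by omega)⟩
      obtain ⟨ch, hch⟩ := hsome
      rw [hget1, hch, hkey]
      cases hg : seen.get? (keyOf s) with
      | none =>
        -- fresh key: insert and continue
        rw [happ]
        apply ih (p ++ [s]) (seen.insert (keyOf s) ch)
        · intro k c hgc
          rw [PySem.Dict.get?_insert] at hgc
          split_ifs at hgc with hk
          · injection hgc with h
            exact ⟨s, by simp, hlen2, by rw [hk], by rw [hch, h]⟩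
          · obtain ⟨t, htp, h⟩ := h1 k c hgc
            exact ⟨t, by simp [htp], h⟩
        · intro t ht hlt
          rw [PySem.Dict.get?_insert]
          split_ifs with hk
          · simp
          · rcases List.mem_append.mp ht with ht | ht
            · exact h2 t ht hlt
            · simp only [List.mem_singleton] at ht; subst ht; exact absurd rfl hk
        · intro a ha b hb ht
          have haux : ∀ a ∈ p, ¬ Tpair a s := by
            intro a ha hT
            have := h2 a ha hT.1
            rw [hT.2.2.1, hg] at this
            simp at this
          rcases List.mem_append.mp ha with ha | ha <;> rcases List.mem_append.mp hb with hb | hb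
          · exact h3 a ha b hb ht
          · have hb' := List.eq_of_mem_singleton hb
            exact haux a ha (hb' ▸ ht)
          · have ha' := List.eq_of_mem_singleton ha
            exact haux b hb (Tpair_symm (ha' ▸ ht))
          · have ha' := List.eq_of_mem_singleton ha
            have hb' := List.eq_of_mem_singleton hb
            exact ht.2.2.2 (by rw [ha', hb'])
      | some c =>
        obtain ⟨s0, hs0p, hs0len, hs0key, hs0char⟩ := h1 (keyOf s) c hg
        by_cases hcc : c = ch
        · -- stored char agrees: continue with the same dict
          subst hcc
          simp only [bne_self_eq_false]
          rw [happ]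
          apply ih (p ++ [s]) seen
          · intro k c' hgc
            obtain ⟨t, htp, h⟩ := h1 k c' hgc
            exact ⟨t, by simp [htp], h⟩
          · intro t ht hlt
            rcases List.mem_append.mp ht with ht | ht
            · exact h2 t ht hlt
            · simp only [List.mem_singleton] at ht; subst ht; simp [hg]
          · intro a ha b hb ht
            have haux : ∀ a ∈ p, ¬ Tpair a s := by
              intro a ha hT
              -- a and s0 share the key of s, so by h3 their index-1 chars agree = c
              have hkas : keyOf a = keyOf s0 := hT.2.2.1.trans hs0key.symm
              have hach : a.toList[1]? = some c := by
                by_cases heq : a = s0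
                · subst heq; exact hs0char
                · by_contra hne
                  exact h3 a ha s0 hs0p ⟨hT.1, hs0len, hkas, by rw [hs0char]; intro h; exact hne (h ▸ rfl)⟩
              exact hT.2.2.2 (hach.trans hch.symm)
            rcases List.mem_append.mp ha with ha | ha <;> rcases List.mem_append.mp hb with hb | hb
            · exact h3 a ha b hb ht
            · have hb' := List.eq_of_mem_singleton hb
              exact haux a ha (hb' ▸ ht)
            · have ha' := List.eq_of_mem_singleton ha
              exact haux b hb (Tpair_symm (ha' ▸ ht))
            · have ha' := List.eq_of_mem_singleton ha
              have hb' := List.eq_of_mem_singleton hb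
              exact ht.2.2.2 (by rw [ha', hb'])
        · -- stored char differs: trigger
          simp only [bne_iff_ne, ne_eq, hcc, not_false_eq_true, if_true, true_iff]
          refine ⟨s0, by simp [hs0p], s, by simp, hs0len, hlen2, hs0key, ?_⟩
          rw [hs0char, hch]
          intro h; exact hcc (by injection h)
    · -- len s < 2: s cannot be in any Tpair
      have hlen2 : s.toList.length < 2 := by
        have : ¬ ((2 : Int) ≤ (s.toList.length : Int)) := by simpa [PySem.Str.len_eq] using hlen
        omega
      rw [happ]
      apply ih (p ++ [s]) seen
      · intro k c hgc
        obtain ⟨t, htp, h⟩ := h1 k c hgc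
        exact ⟨t, by simp [htp], h⟩
      · intro t ht hlt
        rcases List.mem_append.mp ht with ht | ht
        · exact h2 t ht hlt
        · simp only [List.mem_singleton] at ht; subst ht; omega
      · intro a ha b hb ht
        rcases List.mem_append.mp ha with ha | ha <;> rcases List.mem_append.mp hb with hb | hb
        · exact h3 a ha b hb ht
        · have hb' := List.eq_of_mem_singleton hb
          have := (hb' ▸ ht).2.1; omega
        · have ha' := List.eq_of_mem_singleton ha
          have := (ha' ▸ ht).1; omega
        · have ha' := List.eq_of_mem_singleton ha
          have := (ha' ▸ ht).1; omega

theorem checkAltLoop_empty_iff (l : List String) :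
    (checkAltLoop PySem.Dict.empty l = true) ↔ ∃ a ∈ l, ∃ b ∈ l, Tpair a b := by
  have := checkAltLoop_iff l [] PySem.Dict.empty
    (by intro k c h; simp [PySem.Dict.get?_empty] at h)
    (by intro s h; cases h)
    (by intro a h; cases h)
  simpa using this

-- ===== VERDICT (by name: the statement is the Claim_ definition above) =====
theorem check_spec : Claim_equal_check := by
  intro l _
  unfold Spec_check check check_alt
  have h : (l.any (fun el1 => l.any (fun el2 => checkTrig el1 el2)) = true) ↔
      (checkAltLoop PySem.Dict.empty l = true) :=
    (check_any_iff l).trans (checkAltLoop_empty_iff l).symm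
  by_cases hb : checkAltLoop PySem.Dict.empty l = true
  · rw [if_pos (h.mpr hb), if_pos hb]
  · rw [if_neg (fun hh => hb (h.mp hh)), if_neg hb]
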